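-- pv_equiv track=rewrite | github.com/wsheng/fantasy-bot | optimizer.py | _classify_bench_player
-- ===== SOURCE A (Python) =====
-- from typing import Optional
--
-- def _classify_bench_player(player: dict) -> Optional[str]:
--     """
--     Map a bench player to a bench-shape category (G, F, or C).
--
--     Uses the player's eligible positions (not their assigned slot).
--     """
--     positions = player.get("positions", [])
--     if "C" in positions:
--         return "C"
--     if any(p in positions for p in ("SF", "PF", "F")):
--         return "F"
--     if any(p in positions for p in ("PG", "SG", "G")):
--         return "G"
--     return None
-- ===== SOURCE B (Python) =====
-- from typing import Optional
--
-- _RANK = {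
--     "C": (0, "C"),
--     "SF": (1, "F"), "PF": (1, "F"), "F": (1, "F"),
--     "PG": (2, "G"), "SG": (2, "G"), "G": (2, "G"),
-- }
--
-- def _classify_bench_player(player: dict) -> Optional[str]:
--     best = None
--     for p in player.get("positions", []):
--         entry = _RANK.get(p)
--         if entry is not None and (best is None or entry[0] < best[0]):
--             best = entry
--     return None if best is None else best[1]
-- ===== Notes on version B (the rewrite author's own statement) =====
-- stated objective: idiomatic
-- what changed: Replaces the three fixed membership scans over the positions list with a single pass over the positions that looks each up in a rank table and keeps the minimum-rank category.
import Mathlib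
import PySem

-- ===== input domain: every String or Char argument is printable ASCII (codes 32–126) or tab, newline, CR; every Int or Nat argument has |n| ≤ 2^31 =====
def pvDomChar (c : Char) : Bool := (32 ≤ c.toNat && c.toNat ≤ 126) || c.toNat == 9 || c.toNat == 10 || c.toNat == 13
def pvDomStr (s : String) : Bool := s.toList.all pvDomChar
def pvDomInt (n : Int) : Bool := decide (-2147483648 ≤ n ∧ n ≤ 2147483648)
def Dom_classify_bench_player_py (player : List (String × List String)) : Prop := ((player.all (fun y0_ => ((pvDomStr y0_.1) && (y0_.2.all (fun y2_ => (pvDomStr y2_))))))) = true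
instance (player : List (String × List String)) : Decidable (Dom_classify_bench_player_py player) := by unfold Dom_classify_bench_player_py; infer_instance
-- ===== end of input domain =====

-- B replaces A's three fixed membership scans by one pass over positions with a rank table (idiomatic; same cost).

-- ===== PORT A =====
def classify_bench_player_py (player : List (String × List String)) : Option String :=
  let positions := PySem.Dict.getD (PySem.Dict.ofList player) "positions" []
  if positions.contains "C" then some "C"
  else if (["SF", "PF", "F"].any fun p => positions.contains p) then some "F"
  else if (["PG", "SG", "G"].any fun p => positions.contains p) then some "G"
  else none

-- ===== PORT B =====
def pvRank : PySem.Dict String (Nat × String) :=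
  PySem.Dict.ofList
    [("C", (0, "C")), ("SF", (1, "F")), ("PF", (1, "F")), ("F", (1, "F")),
     ("PG", (2, "G")), ("SG", (2, "G")), ("G", (2, "G"))]

def pvStep (best : Option (Nat × String)) (p : String) : Option (Nat × String) :=
  match PySem.Dict.get? pvRank p with
  | none => best
  | some entry =>
    match best with
    | none => some entry
    | some b => if entry.1 < b.1 then some entry else best

def classify_bench_player_py_alt (player : List (String × List String)) : Option String :=
  let positions := PySem.Dict.getD (PySem.Dict.ofList player) "positions" []
  let best := positions.foldl pvStep none
  match best with
  | none => none
  | some b => some b.2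

-- ===== PRECONDITION & SPEC =====
def Spec_classify_bench_player_py (player : List (String × List String)) (out : Option String) : Prop := out = classify_bench_player_py_alt player
instance (player : List (String × List String)) (out : Option String) : Decidable (Spec_classify_bench_player_py player out) := by unfold Spec_classify_bench_player_py; infer_instance

-- ===== CLAIM (what is proved, stated in full; the proofs are below) =====
def Claim_equal_classify_bench_player_py : Prop := ∀ (player : List (String × List String)), Dom_classify_bench_player_py player → Spec_classify_bench_player_py player (classify_bench_player_py player)

-- ===== LEMMAS AND PROOFS =====

-- characterisation of B's fold: for an accumulator from the invariant set, the fold result is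
-- determined by membership of the seven known positions in the remaining list.
theorem pvFold_char (l : List String) (acc : Option (Nat × String))
    (hacc : acc = none ∨ acc = some (0, "C") ∨ acc = some (1, "F") ∨ acc = some (2, "G")) :
    l.foldl pvStep acc =
      if "C" ∈ l ∨ acc = some (0, "C") then some (0, "C")
      else if ("SF" ∈ l ∨ "PF" ∈ l ∨ "F" ∈ l) ∨ acc = some (1, "F") then some (1, "F")
      else if ("PG" ∈ l ∨ "SG" ∈ l ∨ "G" ∈ l) ∨ acc = some (2, "G") then some (2, "G")
      else none := by
  induction l generalizing acc with
  | nil =>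
    rcases hacc with h | h | h | h <;> subst h <;> simp
  | cons p t ih =>
    by_cases hC : p = "C"
    · subst hC
      have hstep : pvStep acc "C" = some (0, "C") := by
        rcases hacc with h|h|h|h <;> subst h <;> decide
      rw [List.foldl_cons, hstep, ih _ (by right; left; rfl)]
      simp
    · by_cases hF : p = "SF" ∨ p = "PF" ∨ p = "F"
      · rw [List.foldl_cons]
        have hstep : pvStep acc p = if acc = some (0, "C") then some (0, "C") else some (1, "F") := by
          rcases hF with h|h|h <;> subst h <;>
            rcases hacc with h|h|h|h <;> subst h <;> decide
        rw [hstep]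
        by_cases h0 : acc = some (0, "C")
        · simp only [h0]
          rw [ih _ (by right; left; rfl)]
          simp
        · simp only [h0]
          rw [ih _ (by right; right; left; rfl)]
          have hne : p ≠ "C" := hC
          rcases hF with h|h|h <;> subst h <;> simp [h0]
      · by_cases hG : p = "PG" ∨ p = "SG" ∨ p = "G"
        · rw [List.foldl_cons]
          have hstep : pvStep acc p =
              if acc = some (0, "C") then some (0, "C")
              else if acc = some (1, "F") then some (1, "F")
              else some (2, "G") := by
            rcases hG with h|h|h <;> subst h <;>
              rcases hacc with h|h|h|h <;> subst h <;> decide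
          rw [hstep]
          by_cases h0 : acc = some (0, "C")
          · simp only [h0]
            rw [ih _ (by right; left; rfl)]; simp
          · by_cases h1 : acc = some (1, "F")
            · simp only [h0, h1]
              rw [ih _ (by right; right; left; rfl)]
              rcases hG with h|h|h <;> subst h <;> simp [hC]
            · simp only [h0, h1]
              rw [ih _ (by right; right; right; rfl)]
              rcases hG with h|h|h <;> subst h <;> simp [hC]
        · -- unknown position: step is identity
          rw [List.foldl_cons]
          have hstep : pvStep acc p = acc := by
            have : PySem.Dict.get? pvRank p = none := by
              push_neg at hF hG
              unfold pvRank
              simp only [PySem.Dict.ofList, PySem.Dict.update, List.foldl]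
              rw [PySem.Dict.get?_insert_of_ne _ _ hG.2.2, PySem.Dict.get?_insert_of_ne _ _ hG.2.1,
                  PySem.Dict.get?_insert_of_ne _ _ hG.1, PySem.Dict.get?_insert_of_ne _ _ hF.2.2,
                  PySem.Dict.get?_insert_of_ne _ _ hF.2.1, PySem.Dict.get?_insert_of_ne _ _ hF.1,
                  PySem.Dict.get?_insert_of_ne _ _ hC, PySem.Dict.get?_empty]
            simp [pvStep, this]
          rw [hstep, ih _ hacc]
          push_neg at hF hG
          simp [Ne.symm hC, Ne.symm hF.1, Ne.symm hF.2.1, Ne.symm hF.2.2,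
                Ne.symm hG.1, Ne.symm hG.2.1, Ne.symm hG.2.2]

-- the two port bodies agree on any positions list
theorem pvBody (l : List String) :
    (if l.contains "C" then (some "C" : Option String)
     else if (["SF", "PF", "F"].any fun p => l.contains p) then some "F"
     else if (["PG", "SG", "G"].any fun p => l.contains p) then some "G"
     else none) =
    (match l.foldl pvStep none with
     | none => none
     | some b => some b.2) := by
  rw [pvFold_char l none (Or.inl rfl)]
  by_cases hC : "C" ∈ l
  · simp [hC]
  · by_cases hF : "SF" ∈ l ∨ "PF" ∈ l ∨ "F" ∈ l
    · simp only [List.contains_eq_mem]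
      rcases hF with h|h|h <;> simp [hC, h]
    · by_cases hG : "PG" ∈ l ∨ "SG" ∈ l ∨ "G" ∈ l
      · push_neg at hF
        simp only [List.contains_eq_mem]
        rcases hG with h|h|h <;> simp [hC, hF.1, hF.2.1, hF.2.2, h]
      · push_neg at hF hG
        simp [List.contains_eq_mem, hC, hF.1, hF.2.1, hF.2.2, hG.1, hG.2.1, hG.2.2]

-- ===== VERDICT (by name: the statement is the Claim_ definition above) =====
theorem classify_bench_player_py_spec : Claim_equal_classify_bench_player_py := by
  intro player _
  exact pvBody (PySem.Dict.getD (PySem.Dict.ofList player) "positions" [])
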